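-- pv_equiv track=rewrite | github.com/TravisPetit/Nurikabe | nurikabe.py | create_t_prime_graph
-- ===== SOURCE A (Python) =====
-- def corresponding_vertex(v):
--     x, y = v
--     return 4 * (x + 1), 4 * (y + 1)
--
-- def insert_s_label(nurikabe_grid, s):
--     sp = corresponding_vertex(s)
--     nurikabe_grid[sp] = "s"
--
-- def insert_t_label(nurikabe_grid, t):
--     tp = corresponding_vertex(t)
--     nurikabe_grid[tp] = "t"
--
-- def create_t_prime_graph(t_graph, s,t, dim):
--     t_prime_graph = {(x, y): " " for x in range(dim) for y in range(dim)}
--     for x in range(1, dim-1):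
--         for y in range(1, dim-1):
--             if t_graph[(x,y)] != " ":
--                 degree = 0
--                 for (dx, dy) in ((-1, 0), (1, 0), (0, -1), (0,1)):
--                     if t_graph[(x + dx, y + dy)] != " ":
--                         degree += 1
--                 if degree > 1:
--                     t_prime_graph[(x, y)] = "o"
--
--     insert_s_label(t_prime_graph, s)
--     insert_t_label(t_prime_graph, t)
--     return t_prime_graph
-- ===== SOURCE B (Python) =====
-- def create_t_prime_graph(t_graph, s, t, dim):
--     # one pass over t_graph: in-grid non-blank cells
--     cells = [(x, y) for (x, y), v in t_graph.items()
--              if v != " " and 0 <= x < dim and 0 <= y < dim]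
--     cellset = set(cells)
--     # scatter pass: deg[v] = number of non-blank 4-neighbours of v
--     deg = {}
--     for (x, y) in cells:
--         for n in ((x - 1, y), (x + 1, y), (x, y - 1), (x, y + 1)):
--             if 0 <= n[0] < dim and 0 <= n[1] < dim:
--                 deg[n] = deg.get(n, 0) + 1
--     out = {(x, y): ("o" if (1 <= x <= dim - 2 and 1 <= y <= dim - 2
--                             and (x, y) in cellset and deg.get((x, y), 0) > 1)
--                     else " ")
--            for x in range(dim) for y in range(dim)}
--     sx, sy = s
--     out[(4 * (sx + 1), 4 * (sy + 1))] = "s"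
--     tx, ty = t
--     out[(4 * (tx + 1), 4 * (ty + 1))] = "t"
--     return out
-- ===== Notes on version B (the rewrite author's own statement) =====
-- stated objective: alternative
-- what changed: B replaces A's per-interior-cell gathering of neighbour degrees from the (mutated) dict by one pass collecting the in-grid non-blank cells, a scatter pass that increments a degree counter at each cell's in-grid neighbours, and a direct row-major comprehension building the output grid; the s/t labels are stamped as before.
import Mathlib
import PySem

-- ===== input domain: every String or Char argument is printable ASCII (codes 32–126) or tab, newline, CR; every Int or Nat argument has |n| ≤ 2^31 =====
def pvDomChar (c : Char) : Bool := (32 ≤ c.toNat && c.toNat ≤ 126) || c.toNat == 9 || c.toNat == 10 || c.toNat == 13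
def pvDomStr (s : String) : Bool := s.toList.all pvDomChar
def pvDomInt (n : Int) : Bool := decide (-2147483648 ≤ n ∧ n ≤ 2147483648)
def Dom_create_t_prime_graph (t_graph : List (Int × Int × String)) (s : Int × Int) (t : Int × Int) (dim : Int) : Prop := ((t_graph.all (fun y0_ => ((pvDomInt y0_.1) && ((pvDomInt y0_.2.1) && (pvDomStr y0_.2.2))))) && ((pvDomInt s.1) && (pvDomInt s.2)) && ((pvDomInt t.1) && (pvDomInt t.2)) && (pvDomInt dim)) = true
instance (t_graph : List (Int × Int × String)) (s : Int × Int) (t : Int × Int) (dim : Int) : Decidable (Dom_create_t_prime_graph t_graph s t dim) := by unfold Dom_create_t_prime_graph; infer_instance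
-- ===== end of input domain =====

-- B replaces A's per-cell neighbour-gathering over a mutated dict by one scatter pass that
-- builds a degree counter from the non-blank cells and then constructs the grid directly
-- (objective: alternative decomposition, same asymptotic cost).

-- ===== PORT A =====
-- first-match lookup in the association list: the model of the dict access t_graph[(x, y)]
def lookup3 : List (Int × Int × String) → Int → Int → Option String
  | [], _, _ => none
  | (a, b, v) :: r, x, y => if a = x ∧ b = y then some v else lookup3 r x y

-- dict assignment d[(x, y)] = v: overwrite the first matching key in place, else append
def dset3 : List (Int × Int × String) → Int → Int → String → List (Int × Int × String)
  | [], x, y, v => [(x, y, v)]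
  | (a, b, w) :: r, x, y, v => if a = x ∧ b = y then (a, b, v) :: r else (a, b, w) :: dset3 r x y v

-- t_graph[(x, y)] with default " ": exact wherever the Python lookup succeeds (Pre_ excludes the KeyError inputs)
def tgetA (g : List (Int × Int × String)) (x y : Int) : String := (lookup3 g x y).getD " "

-- the degree loop of A: for (dx, dy) in ((-1,0),(1,0),(0,-1),(0,1)): if t_graph[(x+dx, y+dy)] != " ": degree += 1
def degA (g : List (Int × Int × String)) (x y : Int) : Int :=
  [((-1 : Int), (0 : Int)), (1, 0), (0, -1), (0, 1)].foldl
    (fun deg d => if tgetA g (x + d.1) (y + d.2) ≠ " " then deg + 1 else deg) 0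

def create_t_prime_graph (t_graph : List (Int × Int × String)) (s : Int × Int) (t : Int × Int) (dim : Int) : List (Int × Int × String) :=
  dset3
    (dset3
      ((PySem.List.pyRange 1 (dim - 1) 1).foldl
        (fun g x => (PySem.List.pyRange 1 (dim - 1) 1).foldl
          (fun g y =>
            if tgetA t_graph x y ≠ " " then
              if degA t_graph x y > 1 then dset3 g x y "o" else g
            else g) g)
        ((PySem.List.pyRange 0 dim 1).foldl
          (fun g x => (PySem.List.pyRange 0 dim 1).foldl (fun g y => dset3 g x y " ") g) []))
      (4 * (s.1 + 1)) (4 * (s.2 + 1)) "s")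
    (4 * (t.1 + 1)) (4 * (t.2 + 1)) "t"

-- ===== PORT B =====
-- t_graph.items(): under the assoc-list convention (lookup = first match) the items are the
-- first occurrence of each key, modelled with an accumulator of keys already seen
def items3Go (seen : List (Int × Int)) : List (Int × Int × String) → List (Int × Int × String)
  | [] => []
  | (x, y, v) :: r =>
    if (x, y) ∈ seen then items3Go seen r else (x, y, v) :: items3Go ((x, y) :: seen) r

def items3 (g : List (Int × Int × String)) : List (Int × Int × String) := items3Go [] g

def inGridB (dim x y : Int) : Bool := decide (0 ≤ x) && decide (x < dim) && decide (0 ≤ y) && decide (y < dim)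

-- cells = [(x, y) for (x, y), v in t_graph.items() if v != " " and 0 <= x < dim and 0 <= y < dim]
def cellsB (g : List (Int × Int × String)) (dim : Int) : List (Int × Int) :=
  ((items3 g).filter (fun e => decide (e.2.2 ≠ " ") && inGridB dim e.1 e.2.1)).map (fun e => (e.1, e.2.1))

def nbrsB (c : Int × Int) : List (Int × Int) := [(c.1 - 1, c.2), (c.1 + 1, c.2), (c.1, c.2 - 1), (c.1, c.2 + 1)]

-- the scatter pass: deg[n] = deg.get(n, 0) + 1 for every in-grid neighbour n of every cell
def degB (g : List (Int × Int × String)) (dim : Int) : PySem.Dict (Int × Int) Int :=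
  (cellsB g dim).foldl (fun d c =>
      (nbrsB c).foldl (fun d n => if inGridB dim n.1 n.2 then d.insert n (d.getD n 0 + 1) else d) d)
    PySem.Dict.empty

def create_t_prime_graph_alt (t_graph : List (Int × Int × String)) (s : Int × Int) (t : Int × Int) (dim : Int) : List (Int × Int × String) :=
  -- the dict comprehension over the row-major grid (all keys fresh), then the two label stamps
  dset3
    (dset3
      ((PySem.List.pyRange 0 dim 1).flatMap (fun x =>
        (PySem.List.pyRange 0 dim 1).map (fun y =>
          (x, y, if 1 ≤ x ∧ x ≤ dim - 2 ∧ 1 ≤ y ∧ y ≤ dim - 2 ∧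
                    PySem.Set.contains (PySem.Set.ofList (cellsB t_graph dim)) (x, y) = true ∧
                    (degB t_graph dim).getD (x, y) 0 > 1
                 then "o" else " "))))
      (4 * (s.1 + 1)) (4 * (s.2 + 1)) "s")
    (4 * (t.1 + 1)) (4 * (t.2 + 1)) "t"

-- ===== PRECONDITION & SPEC =====
-- Pre_ excludes exactly the inputs on which A raises KeyError: some interior cell of the
-- grid is missing from t_graph, or an interior cell is non-blank and one of its four
-- neighbours is missing from t_graph.
-- exactly the inputs on which A raises no KeyError: every interior grid cell occurs as a key
-- (counted: the distinct interior keys are as many as the interior cells), and every interior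
-- key with a non-blank value has its four neighbours as keys
def Pre_create_t_prime_graph (t_graph : List (Int × Int × String)) (s : Int × Int) (t : Int × Int) (dim : Int) : Prop :=
  ((PySem.List.dedup (t_graph.map (fun e => ((e.1, e.2.1) : Int × Int)))).filter
      (fun k => decide (1 ≤ k.1 ∧ k.1 < dim - 1 ∧ 1 ≤ k.2 ∧ k.2 < dim - 1))).length
    = (dim - 2).toNat * (dim - 2).toNat ∧
  ∀ k ∈ PySem.List.dedup (t_graph.map (fun e => ((e.1, e.2.1) : Int × Int))),
    (1 ≤ k.1 ∧ k.1 < dim - 1 ∧ 1 ≤ k.2 ∧ k.2 < dim - 1) →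
    ((PySem.Dict.mk (t_graph.map (fun e => ((e.1, e.2.1), e.2.2)))).getD k " " = " " ∨
      ∀ d ∈ ([((-1 : Int), (0 : Int)), (1, 0), (0, -1), (0, 1)] : List (Int × Int)),
        (k.1 + d.1, k.2 + d.2) ∈ t_graph.map (fun e => ((e.1, e.2.1) : Int × Int)))
instance (t_graph : List (Int × Int × String)) (s : Int × Int) (t : Int × Int) (dim : Int) : Decidable (Pre_create_t_prime_graph t_graph s t dim) := by unfold Pre_create_t_prime_graph; infer_instance

def pvWitness_create_t_prime_graph : (List (Int × Int × String)) × (Int × Int) × (Int × Int) × Int :=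
  ([(1, 1, " ")], (0, 0), (0, 0), 3)

def Spec_create_t_prime_graph (t_graph : List (Int × Int × String)) (s : Int × Int) (t : Int × Int) (dim : Int) (out : List (Int × Int × String)) : Prop := out = create_t_prime_graph_alt t_graph s t dim
instance (t_graph : List (Int × Int × String)) (s : Int × Int) (t : Int × Int) (dim : Int) (out : List (Int × Int × String)) : Decidable (Spec_create_t_prime_graph t_graph s t dim out) := by unfold Spec_create_t_prime_graph; infer_instance

-- ===== CLAIM (what is proved, stated in full; the proofs are below) =====
def Claim_equal_create_t_prime_graph : Prop := ∀ (t_graph : List (Int × Int × String)) (s : Int × Int) (t : Int × Int) (dim : Int), Dom_create_t_prime_graph t_graph s t dim → Pre_create_t_prime_graph t_graph s t dim → Spec_create_t_prime_graph t_graph s t dim (create_t_prime_graph t_graph s t dim)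

-- ===== LEMMAS AND PROOFS =====

-- the row-major list of grid cells, and a grid rendered from a value function
def gridCells (dim : Int) : List (Int × Int) :=
  (PySem.List.pyRange 0 dim 1).flatMap (fun x => (PySem.List.pyRange 0 dim 1).map (fun y => (x, y)))

def interiorCells (dim : Int) : List (Int × Int) :=
  (PySem.List.pyRange 1 (dim - 1) 1).flatMap (fun x => (PySem.List.pyRange 1 (dim - 1) 1).map (fun y => (x, y)))

abbrev condA (g : List (Int × Int × String)) (c : Int × Int) : Prop :=
  tgetA g c.1 c.2 ≠ " " ∧ degA g c.1 c.2 > 1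

lemma mem_gridCells (dim : Int) (c : Int × Int) :
    c ∈ gridCells dim ↔ 0 ≤ c.1 ∧ c.1 < dim ∧ 0 ≤ c.2 ∧ c.2 < dim := by
  obtain ⟨x, y⟩ := c
  simp [gridCells, List.mem_flatMap, PySem.List.mem_pyRange_one]
  tauto

lemma mem_interiorCells (dim : Int) (c : Int × Int) :
    c ∈ interiorCells dim ↔ 1 ≤ c.1 ∧ c.1 < dim - 1 ∧ 1 ≤ c.2 ∧ c.2 < dim - 1 := by
  obtain ⟨x, y⟩ := c
  simp [interiorCells, List.mem_flatMap, PySem.List.mem_pyRange_one]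
  tauto

lemma nodup_gridCells (dim : Int) : (gridCells dim).Nodup := by
  unfold gridCells
  exact List.Nodup.product (PySem.List.nodup_pyRange_one 0 dim) (PySem.List.nodup_pyRange_one 0 dim)

-- dset3 on a fresh key appends
lemma dset3_fresh (g : List (Int × Int × String)) (x y : Int) (v : String)
    (h : ∀ e ∈ g, ¬(e.1 = x ∧ e.2.1 = y)) : dset3 g x y v = g ++ [(x, y, v)] := by
  induction g with
  | nil => rfl
  | cons e r ih =>
    obtain ⟨a, b, w⟩ := e
    have ha := h (a, b, w) (by simp)
    simp only [dset3, if_neg ha]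
    rw [ih (fun e he => h e (by simp [he]))]
    simp
-- building the all-blank grid: the comprehension fold is the rendered constant grid
lemma foldl_dset3_fresh (ks : List (Int × Int)) (g0 : List (Int × Int × String))
    (hk : ks.Nodup) (hdisj : ∀ c ∈ ks, ∀ e ∈ g0, ¬(e.1 = c.1 ∧ e.2.1 = c.2)) :
    ks.foldl (fun g c => dset3 g c.1 c.2 " ") g0 = g0 ++ ks.map (fun c => (c.1, c.2, " ")) := by
  induction ks generalizing g0 with
  | nil => simp
  | cons c ks ih =>
    simp only [List.foldl_cons]
    rw [dset3_fresh g0 c.1 c.2 " " (fun e he h => hdisj c (by simp) e he h)]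
    rw [ih (g0 ++ [(c.1, c.2, " ")]) hk.of_cons]
    · simp
    · intro c' hc' e he
      rcases List.mem_append.1 he with h1 | h2
      · exact hdisj c' (by simp [hc']) e h1
      · simp at h2
        subst h2
        simp only [not_and]
        intro h1 h2
        have : c' = c := by obtain ⟨a,b⟩ := c'; obtain ⟨a',b'⟩ := c; simp_all
        exact (List.nodup_cons.1 hk).1 (this ▸ hc')
-- overwriting an existing key of a rendered grid updates the value function pointwise
lemma dset3_render (ks : List (Int × Int)) (f : Int × Int → String) (a b : Int) (v : String)
    (hk : ks.Nodup) (hc : (a, b) ∈ ks) :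
    dset3 (ks.map (fun c => (c.1, c.2, f c))) a b v
      = ks.map (fun c => (c.1, c.2, if c = (a, b) then v else f c)) := by
  induction ks with
  | nil => simp at hc
  | cons k ks ih =>
    by_cases hk1 : k = (a, b)
    · subst hk1
      simp only [List.map_cons, dset3]
      simp only [and_self, if_true]
      congr 1
      apply List.map_congr_left
      intro c hcks
      have : c ≠ (a, b) := fun h => (List.nodup_cons.1 hk).1 (h ▸ hcks)
      simp [this]
    · have hne : ¬(k.1 = a ∧ k.2 = b) := by
        intro ⟨h1, h2⟩; exact hk1 (Prod.ext h1 h2)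
      simp only [List.map_cons, dset3, if_neg hne, if_neg hk1]
      rw [ih hk.of_cons ((List.mem_cons.1 hc).resolve_left (fun h => hk1 h.symm))]
-- the marking fold over any list of cells of a rendered grid
lemma foldl_mark (ks : List (Int × Int)) (P : Int × Int → Prop) [DecidablePred P]
    (cs : List (Int × Int)) (f : Int × Int → String)
    (hk : ks.Nodup) (hcs : ∀ c ∈ cs, c ∈ ks) :
    cs.foldl (fun g c => if P c then dset3 g c.1 c.2 "o" else g) (ks.map (fun c => (c.1, c.2, f c)))
      = ks.map (fun c => (c.1, c.2, if c ∈ cs ∧ P c then "o" else f c)) := by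
  induction cs generalizing f with
  | nil => simp
  | cons c0 cs ih =>
    have hcs' : ∀ c ∈ cs, c ∈ ks := fun c hc => hcs c (List.mem_cons_of_mem _ hc)
    simp only [List.foldl_cons]
    by_cases hP : P c0
    · rw [if_pos hP, dset3_render ks f c0.1 c0.2 "o" hk (by simpa using hcs c0 (by simp))]
      rw [ih _ hcs']
      apply List.map_congr_left
      intro c hcks
      congr 1
      by_cases h1 : c ∈ cs ∧ P c
      · rw [if_pos h1, if_pos ⟨List.mem_cons_of_mem _ h1.1, h1.2⟩]
      · rw [if_neg h1]
        by_cases h2 : c = c0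
        · rw [if_pos (by simp [h2]), if_pos ⟨by simp [h2], h2 ▸ hP⟩]
        · rw [if_neg (by simp [h2]),
            if_neg (fun hc => h1 ⟨(List.mem_cons.1 hc.1).resolve_left h2, hc.2⟩)]
    · rw [if_neg hP, ih f hcs']
      apply List.map_congr_left
      intro c hcks
      congr 1
      by_cases h1 : c ∈ cs ∧ P c
      · rw [if_pos h1, if_pos ⟨List.mem_cons_of_mem _ h1.1, h1.2⟩]
      · rw [if_neg h1,
          if_neg (fun hc : c ∈ c0 :: cs ∧ P c =>
            (List.mem_cons.1 hc.1).resolve_left (fun he => absurd (he ▸ hc.2) hP) |>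
              (fun hm => h1 ⟨hm, hc.2⟩))]
-- items3: membership ↔ first-match lookup, and its keys are distinct
lemma mem_items3Go_iff (r : List (Int × Int × String)) :
    ∀ (seen : List (Int × Int)) (x y : Int) (v : String),
      (x, y, v) ∈ items3Go seen r ↔ ((x, y) ∉ seen ∧ lookup3 r x y = some v) := by
  induction r with
  | nil => intro seen x y v; simp [items3Go, lookup3]
  | cons e r ih =>
    intro seen x y v
    obtain ⟨p, q, w⟩ := e
    by_cases hxy : p = x ∧ q = y
    · obtain ⟨rfl, rfl⟩ := hxy
      by_cases hs : (p, q) ∈ seen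
      · simp only [items3Go, if_pos hs, ih, lookup3]
        constructor
        · rintro ⟨hns, _⟩; exact absurd hs hns
        · rintro ⟨hns, _⟩; exact absurd hs hns
      · simp only [items3Go, if_neg hs, List.mem_cons, ih, lookup3]
        constructor
        · rintro (he | ⟨hns, _⟩)
          · have hvw : v = w := by simpa using he
            exact ⟨hs, by simp [hvw]⟩
          · exact absurd (by simp) hns
        · rintro ⟨hns, hv⟩
          exact Or.inl (by simp_all)
    · have hxy' : ¬((x, y) = (p, q)) := by
        rintro h; exact hxy ⟨(Prod.mk.injEq .. ▸ h).1.symm, (Prod.mk.injEq .. ▸ h).2.symm⟩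
      by_cases hs : (p, q) ∈ seen
      · simp only [items3Go, if_pos hs, ih, lookup3, if_neg hxy]
      · simp only [items3Go, if_neg hs, List.mem_cons, ih, lookup3, if_neg hxy,
          List.mem_cons]
        constructor
        · rintro (he | ⟨hns, hv⟩)
          · exact absurd (by simpa using congrArg (fun e => ((e.1, e.2.1) : Int × Int)) he) hxy'
          · exact ⟨fun hm => hns (Or.inr hm), hv⟩
        · rintro ⟨hns, hv⟩
          exact Or.inr ⟨by simp [hxy', hns], hv⟩

lemma mem_items3_iff (g : List (Int × Int × String)) (x y : Int) (v : String) :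
    (x, y, v) ∈ items3 g ↔ lookup3 g x y = some v := by
  simpa [items3] using mem_items3Go_iff g [] x y v

lemma nodup_keys_items3Go (r : List (Int × Int × String)) :
    ∀ seen : List (Int × Int),
      ((items3Go seen r).map (fun e => ((e.1, e.2.1) : Int × Int))).Nodup ∧
      (∀ k ∈ (items3Go seen r).map (fun e => ((e.1, e.2.1) : Int × Int)), k ∉ seen) := by
  induction r with
  | nil => intro seen; simp [items3Go]
  | cons e r ih =>
    intro seen
    obtain ⟨p, q, w⟩ := e
    by_cases hs : (p, q) ∈ seen
    · simpa [items3Go, hs] using ih seen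
    · simp only [items3Go, if_neg hs, List.map_cons, List.nodup_cons]
      obtain ⟨ihn, ihs⟩ := ih ((p, q) :: seen)
      refine ⟨⟨fun hmem => (ihs _ hmem) (by simp), ihn⟩, ?_⟩
      intro k hk
      rcases List.mem_cons.1 hk with rfl | hk'
      · exact hs
      · exact fun hkseen => (ihs k hk') (List.mem_cons_of_mem _ hkseen)

lemma nodup_keys_items3 (g : List (Int × Int × String)) :
    ((items3 g).map (fun e => ((e.1, e.2.1) : Int × Int))).Nodup :=
  (nodup_keys_items3Go g []).1

lemma nodup_cellsB (g : List (Int × Int × String)) (dim : Int) : (cellsB g dim).Nodup := by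
  unfold cellsB
  exact (nodup_keys_items3 g).sublist (List.Sublist.map _ List.filter_sublist)

-- membership in cells ↔ non-blank lookup, for in-grid cells
lemma mem_cellsB (g : List (Int × Int × String)) (dim : Int) (c : Int × Int)
    (hg : inGridB dim c.1 c.2 = true) :
    c ∈ cellsB g dim ↔ tgetA g c.1 c.2 ≠ " " := by
  obtain ⟨x, y⟩ := c
  unfold cellsB
  simp only [List.mem_map, List.mem_filter]
  constructor
  · rintro ⟨⟨e1, e2, e3⟩, ⟨hmem, hcond⟩, hek⟩
    simp at hek
    obtain ⟨rfl, rfl⟩ := hek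
    have := (mem_items3_iff g e1 e2 e3).1 hmem
    simp at hcond
    simp [tgetA, this]
    exact hcond.1
  · intro hne
    rcases hl : lookup3 g x y with _ | v
    · exact absurd (by simp [tgetA, hl]) hne
    · refine ⟨(x, y, v), ⟨(mem_items3_iff g x y v).2 hl, ?_⟩, rfl⟩
      have hv : v ≠ " " := by simpa [tgetA, hl] using hne
      simp [hv]
      exact hg

lemma countP_mem_comm (l ns : List (Int × Int)) (hl : l.Nodup) (hn : ns.Nodup) :
    l.countP (fun x => decide (x ∈ ns)) = ns.countP (fun x => decide (x ∈ l)) := by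
  rw [List.countP_eq_length_filter, List.countP_eq_length_filter,
    ← List.toFinset_card_of_nodup (hl.filter _), ← List.toFinset_card_of_nodup (hn.filter _),
    List.toFinset_filter, List.toFinset_filter]
  congr 1
  ext a
  simp only [Finset.mem_filter, List.mem_toFinset, decide_eq_true_eq]
  tauto

lemma nodup_nbrsB (c : Int × Int) : (nbrsB c).Nodup := by
  obtain ⟨x, y⟩ := c
  simp [nbrsB, Prod.mk.injEq]
  omega

lemma mem_nbrsB_comm (u c : Int × Int) : u ∈ nbrsB c ↔ c ∈ nbrsB u := by
  obtain ⟨a, b⟩ := u; obtain ⟨x, y⟩ := c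
  simp [nbrsB, Prod.mk.injEq]
  omega

lemma count_nbrs_filter (dim : Int) (u c : Int × Int) (hc : inGridB dim c.1 c.2 = true) :
    ((nbrsB u).filter (fun n => inGridB dim n.1 n.2)).count c = if u ∈ nbrsB c then 1 else 0 := by
  rw [List.count_filter (p := fun n : Int × Int => inGridB dim n.1 n.2) (a := c) (l := nbrsB u) (by simpa using hc)]
  simp only [mem_nbrsB_comm]
  obtain ⟨a, b⟩ := u; obtain ⟨x, y⟩ := c
  simp only [nbrsB, List.count_cons, List.count_nil, List.mem_cons, List.not_mem_nil,
    beq_iff_eq, Prod.mk.injEq, or_false]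
  split_ifs <;> omega

lemma degB_eq_counter (g : List (Int × Int × String)) (dim : Int) :
    degB g dim = PySem.Dict.counter
      ((cellsB g dim).flatMap (fun u => (nbrsB u).filter (fun n => inGridB dim n.1 n.2))) := by
  unfold degB
  rw [← PySem.Dict.foldl_insert_getD_add_one_eq_counter, List.foldl_flatMap]
  have h : ∀ (d : PySem.Dict (Int × Int) Int) (c : Int × Int),
      (nbrsB c).foldl (fun d n => if inGridB dim n.1 n.2 then d.insert n (d.getD n 0 + 1) else d) d
        = ((nbrsB c).filter (fun n => inGridB dim n.1 n.2)).foldl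
            (fun d n => d.insert n (d.getD n 0 + 1)) d := fun d c => List.foldl_filter.symm
  simp only [h]

lemma degA_eq_countP (g : List (Int × Int × String)) (c : Int × Int) :
    degA g c.1 c.2 = ((nbrsB c).countP (fun w => decide (tgetA g w.1 w.2 ≠ " ")) : Int) := by
  obtain ⟨x, y⟩ := c
  have e1 : x + (-1) = x - 1 := by ring
  have e2 : y + (-1) = y - 1 := by ring
  have e3 : x + 0 = x := by ring
  have e4 : y + 0 = y := by ring
  simp only [degA, nbrsB, List.foldl_cons, List.foldl_nil, List.countP_cons, List.countP_nil,
    e1, e2, e3, e4]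
  split_ifs <;> simp_all

-- the degree dictionary agrees with A's degree on interior cells
lemma degB_getD (g : List (Int × Int × String)) (dim : Int) (c : Int × Int)
    (hc : 1 ≤ c.1 ∧ c.1 < dim - 1 ∧ 1 ≤ c.2 ∧ c.2 < dim - 1) :
    (degB g dim).getD c 0 = degA g c.1 c.2 := by
  have hcin : inGridB dim c.1 c.2 = true := by simp [inGridB]; omega
  rw [degB_eq_counter, PySem.Dict.getD_counter, List.count_flatMap]
  have h1 : ((cellsB g dim).map
      (List.count c ∘ fun u => (nbrsB u).filter (fun n => inGridB dim n.1 n.2)))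
      = (cellsB g dim).map (fun u => if decide (u ∈ nbrsB c) = true then 1 else 0) := by
    apply List.map_congr_left
    intro u _
    simpa using count_nbrs_filter dim u c hcin
  rw [h1, PySem.List.sum_map_ite_one_zero_nat]
  rw [countP_mem_comm _ _ (nodup_cellsB g dim) (nodup_nbrsB c)]
  rw [degA_eq_countP]
  congr 1
  apply List.countP_congr
  intro w hw
  have hwin : inGridB dim w.1 w.2 = true := by
    obtain ⟨a, b⟩ := w
    obtain ⟨x, y⟩ := c
    simp [nbrsB, Prod.mk.injEq] at hw
    simp [inGridB]
    rcases hw with ⟨rfl, rfl⟩ | ⟨rfl, rfl⟩ | ⟨rfl, rfl⟩ | ⟨rfl, rfl⟩ <;> simp at hc ⊢ <;> omega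
  simp [mem_cellsB g dim w hwin]

-- the pre-label grids of the two ports coincide
theorem pre_label_eq (t_graph : List (Int × Int × String)) (dim : Int) :
    (PySem.List.pyRange 1 (dim - 1) 1).foldl
      (fun g x => (PySem.List.pyRange 1 (dim - 1) 1).foldl
        (fun g y =>
          if tgetA t_graph x y ≠ " " then
            if degA t_graph x y > 1 then dset3 g x y "o" else g
          else g) g)
      ((PySem.List.pyRange 0 dim 1).foldl
        (fun g x => (PySem.List.pyRange 0 dim 1).foldl (fun g y => dset3 g x y " ") g) [])
    = (PySem.List.pyRange 0 dim 1).flatMap (fun x =>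
        (PySem.List.pyRange 0 dim 1).map (fun y =>
          (x, y, if 1 ≤ x ∧ x ≤ dim - 2 ∧ 1 ≤ y ∧ y ≤ dim - 2 ∧
                    PySem.Set.contains (PySem.Set.ofList (cellsB t_graph dim)) (x, y) = true ∧
                    (degB t_graph dim).getD (x, y) 0 > 1
                 then "o" else " "))) := by
  have hgd := nodup_gridCells dim
  -- the all-blank initial grid
  have h1 : ∀ (g : List (Int × Int × String)) (x : Int),
      (PySem.List.pyRange 0 dim 1).foldl (fun g y => dset3 g x y " ") g
        = ((PySem.List.pyRange 0 dim 1).map (fun y => ((x, y) : Int × Int))).foldl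
            (fun g c => dset3 g c.1 c.2 " ") g := by
    intro g x; rw [List.foldl_map]
  have hinit : (PySem.List.pyRange 0 dim 1).foldl
      (fun g x => (PySem.List.pyRange 0 dim 1).foldl (fun g y => dset3 g x y " ") g) []
      = (gridCells dim).map (fun c => (c.1, c.2, " ")) := by
    simp only [h1]
    rw [← List.foldl_flatMap]
    rw [show ((PySem.List.pyRange 0 dim 1).flatMap
        (fun x => (PySem.List.pyRange 0 dim 1).map (fun y => ((x, y) : Int × Int)))) =
        gridCells dim from rfl]
    rw [foldl_dset3_fresh (gridCells dim) [] hgd (by simp)]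
    simp
  -- the marking phase
  have h2 : ∀ (g : List (Int × Int × String)) (x : Int),
      (PySem.List.pyRange 1 (dim - 1) 1).foldl
        (fun g y =>
          if tgetA t_graph x y ≠ " " then
            if degA t_graph x y > 1 then dset3 g x y "o" else g
          else g) g
        = ((PySem.List.pyRange 1 (dim - 1) 1).map (fun y => ((x, y) : Int × Int))).foldl
            (fun g c => if condA t_graph c then dset3 g c.1 c.2 "o" else g) g := by
    intro g x
    rw [List.foldl_map]
    congr 1
    funext g y
    by_cases ha : tgetA t_graph x y ≠ " " <;> by_cases hb : degA t_graph x y > 1 <;>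
      simp [condA, ha, hb]
  simp only [h2]
  rw [hinit, ← List.foldl_flatMap]
  rw [show ((PySem.List.pyRange 1 (dim - 1) 1).flatMap
      (fun x => (PySem.List.pyRange 1 (dim - 1) 1).map (fun y => ((x, y) : Int × Int)))) =
      interiorCells dim from rfl]
  rw [foldl_mark (gridCells dim) (condA t_graph) (interiorCells dim) (fun _ => " ") hgd
    (fun c hc => by rw [mem_gridCells]; rw [mem_interiorCells] at hc; omega)]
  -- now compare the two rendered grids pointwise
  have hR : (PySem.List.pyRange 0 dim 1).flatMap (fun x =>
        (PySem.List.pyRange 0 dim 1).map (fun y =>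
          (x, y, if 1 ≤ x ∧ x ≤ dim - 2 ∧ 1 ≤ y ∧ y ≤ dim - 2 ∧
                    PySem.Set.contains (PySem.Set.ofList (cellsB t_graph dim)) (x, y) = true ∧
                    (degB t_graph dim).getD (x, y) 0 > 1
                 then "o" else " ")))
      = (gridCells dim).map (fun c =>
          (c.1, c.2, if 1 ≤ c.1 ∧ c.1 ≤ dim - 2 ∧ 1 ≤ c.2 ∧ c.2 ≤ dim - 2 ∧
                    PySem.Set.contains (PySem.Set.ofList (cellsB t_graph dim)) c = true ∧
                    (degB t_graph dim).getD c 0 > 1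
                 then "o" else " ")) := by
    unfold gridCells
    rw [List.map_flatMap]
    congr 1
    funext x
    rw [List.map_map]
    rfl
  rw [hR]
  apply List.map_congr_left
  intro c hcg
  rw [mem_gridCells] at hcg
  congr 1
  congr 1
  apply if_congr _ rfl rfl
  rw [mem_interiorCells]
  constructor
  · rintro ⟨⟨ha, hb, hc', hd⟩, ⟨hne, hdeg⟩⟩
    have hgin : inGridB dim c.1 c.2 = true := by simp [inGridB]; omega
    refine ⟨ha, by omega, hc', by omega, ?_, ?_⟩
    · have := (mem_cellsB t_graph dim c hgin).2 hne
      simpa [PySem.Set.contains, PySem.Set.mem_ofList] using this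
    · rw [degB_getD t_graph dim c ⟨ha, hb, hc', hd⟩]; exact hdeg
  · rintro ⟨ha, hb, hc', hd, hcon, hdeg⟩
    have hgin : inGridB dim c.1 c.2 = true := by simp [inGridB]; omega
    have hbnd : 1 ≤ c.1 ∧ c.1 < dim - 1 ∧ 1 ≤ c.2 ∧ c.2 < dim - 1 := by omega
    refine ⟨⟨ha, by omega, hc', by omega⟩, ?_, ?_⟩
    · have : c ∈ cellsB t_graph dim := by
        simpa [PySem.Set.contains, PySem.Set.mem_ofList] using hcon
      exact (mem_cellsB t_graph dim c hgin).1 this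
    · rw [← degB_getD t_graph dim c hbnd]; exact hdeg

-- ===== VERDICT (by name: the statement is the Claim_ definition above) =====
theorem create_t_prime_graph_spec : Claim_equal_create_t_prime_graph := by
  intro t_graph s t dim _ _
  unfold Spec_create_t_prime_graph create_t_prime_graph create_t_prime_graph_alt
  rw [pre_label_eq]
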